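-- pv_equiv track=rewrite | github.com/tmweigand/PMMoTo | src/pmmoto/core/octants.py | get_neighbors_vertices
-- ===== SOURCE A (Python) =====
-- def get_neighbors_vertices(
--     index: tuple[int, ...] = (0, 0, 0),
--     boundary_face: None | tuple[int, ...] | list[int] = None,
-- ):
--     """Determine the vertices for neighborhoods.
--
--     Given an index indicating the relative position (-1, 0, 1) along each axis,
--     compute which neighbor vertices should be considered. This accounts for
--     edge and corner cases by adjusting which ranges are iterated over.
--
--     If boundary_face is specified, only the vertices on the face are provided.
--
--     Args:
--         index: The boundary index
--         boundary_face: The boundary face index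
--
--     """
--     if boundary_face is None:
--         boundary_face = (0, 0, 0)
--
--     # Can only extract on faces
--     assert sum(abs(_id) for _id in boundary_face) < 2
--
--     neighbor_vertices = []
--     loop = [[-1, 1] for _ in index]
--
--     for n, (ind, b_face) in enumerate(zip(index, boundary_face)):
--         if ind == -1:
--             loop[n][0] = 0
--         if b_face == -1:
--             loop[n][1] = 0
--         elif ind == 1:
--             loop[n][1] = 0
--         if b_face == 1:
--             loop[n][0] = 0
--
--     for dx in range(loop[0][0], loop[0][1] + 1):
--         for dy in range(loop[1][0], loop[1][1] + 1):
--             for dz in range(loop[2][0], loop[2][1] + 1):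
--                 idx = (dx + 1) * 9 + (dy + 1) * 3 + (dz + 1)
--                 neighbor_vertices.append(idx)
--
--     return neighbor_vertices
-- ===== SOURCE B (Python) =====
-- def get_neighbors_vertices(
--     index: tuple[int, ...] = (0, 0, 0),
--     boundary_face=None,
-- ):
--     """Closed-form per-axis bounds, then a single filter pass over the 27 cells."""
--     if boundary_face is None:
--         boundary_face = (0, 0, 0)
--
--     assert sum(abs(_id) for _id in boundary_face) < 2
--
--     m = min(len(index), len(boundary_face))
--     bounds = []
--     for n in range(3):
--         if n < m:
--             ind, b = index[n], boundary_face[n]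
--             lo = 0 if (ind == -1 or b == 1) else -1
--             hi = 0 if (b == -1 or ind == 1) else 1
--         else:
--             lo, hi = -1, 1
--         bounds.append((lo, hi))
--
--     return [
--         v
--         for v in range(27)
--         if all(lo + 1 <= c <= hi + 1
--                for (lo, hi), c in zip(bounds, (v // 9, (v // 3) % 3, v % 3)))
--     ]
-- ===== Notes on version B (the rewrite author's own statement) =====
-- stated objective: alternative
-- what changed: Replaces A's in-place mutation of per-axis [lo,hi] lists plus a triple-nested range loop with closed-form per-axis bounds and a single filter pass over the 27 decoded cells v -> (v//9, (v//3)%3, v%3).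
import Mathlib
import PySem

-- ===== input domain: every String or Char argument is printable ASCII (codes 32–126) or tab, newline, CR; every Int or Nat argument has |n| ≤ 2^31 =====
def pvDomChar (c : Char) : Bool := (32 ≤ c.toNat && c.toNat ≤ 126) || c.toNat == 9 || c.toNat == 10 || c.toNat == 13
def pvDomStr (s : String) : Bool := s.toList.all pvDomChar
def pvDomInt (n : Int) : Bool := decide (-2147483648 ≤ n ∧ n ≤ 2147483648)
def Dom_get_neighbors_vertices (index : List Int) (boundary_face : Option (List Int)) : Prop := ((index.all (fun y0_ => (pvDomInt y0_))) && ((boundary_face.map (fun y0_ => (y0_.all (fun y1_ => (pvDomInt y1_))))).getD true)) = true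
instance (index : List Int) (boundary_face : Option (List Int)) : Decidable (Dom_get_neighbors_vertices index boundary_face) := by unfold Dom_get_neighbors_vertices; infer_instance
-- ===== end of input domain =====

-- B replaces A's mutate-and-triple-loop with closed-form per-axis bounds and one filter
-- pass over the 27 cells (objective: alternative decomposition, same cost).

-- ===== PORT A =====
-- the per-iteration body of A's adjustment loop: read loop[n], apply the three ifs, write back
def pvAdj (l : Int × Int) (ind b : Int) : Int × Int :=
  let l := if ind = -1 then ((0 : Int), l.2) else l
  let l := if b = -1 then (l.1, (0 : Int)) else if ind = 1 then (l.1, (0 : Int)) else l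
  if b = 1 then ((0 : Int), l.2) else l

def pvAdjStep (loop : List (Int × Int)) (q : (Int × Int) × Nat) : List (Int × Int) :=
  loop.set q.2 (pvAdj (loop.getD q.2 (-1, 1)) q.1.1 q.1.2)

-- A's triple nested loop over the ranges of loop[0], loop[1], loop[2]
def pvEnumA (p0 p1 p2 : Int × Int) : List Int :=
  (PySem.List.pyRange p0.1 (p0.2 + 1) 1).flatMap (fun dx =>
    (PySem.List.pyRange p1.1 (p1.2 + 1) 1).flatMap (fun dy =>
      (PySem.List.pyRange p2.1 (p2.2 + 1) 1).map (fun dz =>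
        (dx + 1) * 9 + (dy + 1) * 3 + (dz + 1))))

def get_neighbors_vertices (index : List Int) (boundary_face : Option (List Int)) : List Int :=
  let bf := boundary_face.getD [0, 0, 0]
  -- `assert sum(abs(_id) for _id in boundary_face) < 2` raises outside Pre_
  let loop0 : List (Int × Int) := index.map (fun _ => ((-1 : Int), (1 : Int)))
  let loop := ((index.zip bf).zipIdx).foldl pvAdjStep loop0
  match loop with
  | p0 :: p1 :: p2 :: _ => pvEnumA p0 p1 p2
  | _ => []  -- Python raises IndexError here (loop shorter than 3); excluded by Pre_

-- ===== PORT B =====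
-- B's single filter pass over the 27 cells against the bounds list
def pvFilterB (bounds : List (Int × Int)) : List Int :=
  (PySem.List.pyRange 0 27 1).filter (fun v =>
    (bounds.zip [PySem.Int.floordiv v 9, PySem.Int.mod (PySem.Int.floordiv v 3) 3,
                 PySem.Int.mod v 3]).all
      (fun p => decide (p.1.1 + 1 ≤ p.2) && decide (p.2 ≤ p.1.2 + 1)))

def get_neighbors_vertices_alt (index : List Int) (boundary_face : Option (List Int)) : List Int :=
  let bf := boundary_face.getD [0, 0, 0]
  -- same assert as A; raises outside Pre_
  let m := min index.length bf.length
  let bounds := (List.range 3).map (fun n =>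
    if n < m then
      let ind := index.getD n 0
      let b := bf.getD n 0
      ((if ind = -1 ∨ b = 1 then (0 : Int) else -1), (if b = -1 ∨ ind = 1 then (0 : Int) else 1))
    else ((-1 : Int), (1 : Int)))
  pvFilterB bounds

-- ===== PRECONDITION & SPEC =====
-- Pre_ excludes exactly where A raises: len(index) < 3 (IndexError on loop[2]) and
-- boundary faces with sum(abs) ≥ 2 (AssertionError).
def Pre_get_neighbors_vertices (index : List Int) (boundary_face : Option (List Int)) : Prop :=
  3 ≤ index.length ∧ ((boundary_face.getD [0, 0, 0]).map (fun b => |b|)).sum < 2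
instance (index : List Int) (boundary_face : Option (List Int)) : Decidable (Pre_get_neighbors_vertices index boundary_face) := by unfold Pre_get_neighbors_vertices; infer_instance

def pvWitness_get_neighbors_vertices : List Int × Option (List Int) := ([0, 0, 0], some [1, 0, 0])

def Spec_get_neighbors_vertices (index : List Int) (boundary_face : Option (List Int)) (out : List Int) : Prop := out = get_neighbors_vertices_alt index boundary_face
instance (index : List Int) (boundary_face : Option (List Int)) (out : List Int) : Decidable (Spec_get_neighbors_vertices index boundary_face out) := by unfold Spec_get_neighbors_vertices; infer_instance

-- ===== CLAIM (what is proved, stated in full; the proofs are below) =====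
def Claim_equal_get_neighbors_vertices : Prop := ∀ (index : List Int) (boundary_face : Option (List Int)), Dom_get_neighbors_vertices index boundary_face → Pre_get_neighbors_vertices index boundary_face → Spec_get_neighbors_vertices index boundary_face (get_neighbors_vertices index boundary_face)

-- ===== LEMMAS AND PROOFS =====

-- the fold of A's adjustment loop, read back pointwise
lemma foldl_adjStep_length (ps : List ((Int × Int) × Nat)) (init : List (Int × Int)) :
    (ps.foldl pvAdjStep init).length = init.length := by
  induction ps generalizing init with
  | nil => rfl
  | cons p tl ih => simp [List.foldl_cons, ih, pvAdjStep]

lemma foldl_adjStep_getD (ps : List (Int × Int)) (init : List (Int × Int)) (off k : Nat)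
    (hlen : off + ps.length ≤ init.length) :
    ((ps.zipIdx off).foldl pvAdjStep init).getD k (-1, 1)
      = if off ≤ k ∧ k < off + ps.length then
          pvAdj (init.getD k (-1, 1)) (ps.getD (k - off) (0, 0)).1 (ps.getD (k - off) (0, 0)).2
        else init.getD k (-1, 1) := by
  induction ps generalizing init off with
  | nil => simp
  | cons p tl ih =>
    have hofflt : off < init.length := by simp at hlen; omega
    rw [List.zipIdx_cons, List.foldl_cons]
    have hset : (pvAdjStep init (p, off)).length = init.length := by
      simp [pvAdjStep]
    have hlen' : off + 1 + tl.length ≤ (pvAdjStep init (p, off)).length := by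
      rw [hset]; simp at hlen; omega
    rw [ih (pvAdjStep init (p, off)) (off + 1) hlen']
    by_cases hk : off + 1 ≤ k ∧ k < off + 1 + tl.length
    · have hne : off ≠ k := by omega
      have : (pvAdjStep init (p, off)).getD k (-1, 1) = init.getD k (-1, 1) := by
        simp [pvAdjStep, List.getD_eq_getElem?_getD, List.getElem?_set_ne hne]
      rw [if_pos hk, this, if_pos (⟨by omega, by simp only [List.length_cons]; omega⟩ : off ≤ k ∧ k < off + (p :: tl).length)]
      have hkk : k - off = (k - (off + 1)) + 1 := by omega
      simp [hkk]
    · rw [if_neg hk]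
      by_cases hke : k = off
      · rw [← hke] at hofflt ⊢
        rw [if_pos (⟨Nat.le_refl _, by simp only [List.length_cons]; omega⟩ : k ≤ k ∧ k < k + (p :: tl).length)]
        simp [pvAdjStep, List.getD_eq_getElem?_getD, List.getElem?_set_self hofflt]
      · have hne : off ≠ k := fun h => hke h.symm
        rw [if_neg (by simp only [List.length_cons]; omega)]
        simp [pvAdjStep, List.getD_eq_getElem?_getD, List.getElem?_set_ne hne]

-- A's adjustment of (-1, 1), in B's closed form
lemma pvAdj_closed (ind b : Int) :
    pvAdj (-1, 1) ind b
      = ((if ind = -1 ∨ b = 1 then (0 : Int) else -1), (if b = -1 ∨ ind = 1 then (0 : Int) else 1)) := by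
  simp only [pvAdj]
  split_ifs <;> simp_all

-- the four pairs either program can produce on an axis
def pvPairOK (p : Int × Int) : Prop :=
  p = (-1, 0) ∨ p = (-1, 1) ∨ p = (0, 0) ∨ p = (0, 1)

lemma pvAdj_closed_ok (ind b : Int) : pvPairOK (pvAdj (-1, 1) ind b) := by
  rw [pvAdj_closed]
  unfold pvPairOK
  split_ifs <;> simp

lemma enum_eq_filter (p0 p1 p2 : Int × Int)
    (h0 : pvPairOK p0) (h1 : pvPairOK p1) (h2 : pvPairOK p2) :
    pvEnumA p0 p1 p2 = pvFilterB [p0, p1, p2] := by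
  unfold pvPairOK at h0 h1 h2
  rcases h0 with rfl | rfl | rfl | rfl <;> rcases h1 with rfl | rfl | rfl | rfl <;>
    rcases h2 with rfl | rfl | rfl | rfl <;> decide

lemma zip_getD (xs ys : List Int) (k : Nat) (hk : k < min xs.length ys.length) :
    (xs.zip ys).getD k (0, 0) = (xs.getD k 0, ys.getD k 0) := by
  have hx : k < xs.length := by omega
  have hy : k < ys.length := by omega
  have hz : k < (xs.zip ys).length := by simp; omega
  simp [List.getD_eq_getElem?_getD, List.getElem?_eq_getElem, hx, hy, hz, List.getElem_zip]

-- the k-th pair of A's adjusted loop list, for k < 3 ≤ index.length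
lemma loopA_getD (index bf : List Int) (k : Nat) (hk : k < index.length) :
    (((index.zip bf).zipIdx).foldl pvAdjStep (index.map (fun _ => ((-1 : Int), (1 : Int))))).getD k (-1, 1)
      = if k < min index.length bf.length then
          pvAdj (-1, 1) (index.getD k 0) (bf.getD k 0)
        else (-1, 1) := by
  have hlen : 0 + (index.zip bf).length ≤ (index.map (fun _ => ((-1 : Int), (1 : Int)))).length := by
    simp
  rw [foldl_adjStep_getD _ _ 0 k hlen]
  simp only [List.length_zip, Nat.zero_add, Nat.sub_zero, Nat.zero_le, true_and]
  by_cases h : k < min index.length bf.length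
  · rw [if_pos h, if_pos h, zip_getD _ _ _ h]
    have : (index.map (fun _ => ((-1 : Int), (1 : Int)))).getD k (-1, 1) = (-1, 1) := by
      simp [List.getD_eq_getElem?_getD, List.getElem?_map, List.getElem?_eq_getElem, hk]
    rw [this]
  · rw [if_neg h, if_neg h]
    simp [List.getD_eq_getElem?_getD, List.getElem?_map, List.getElem?_eq_getElem, hk]

-- ===== VERDICT (by name: the statement is the Claim_ definition above) =====
theorem get_neighbors_vertices_spec : Claim_equal_get_neighbors_vertices := by
  intro index boundary_face _ hpre
  unfold Spec_get_neighbors_vertices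
  obtain ⟨hlen, -⟩ := hpre
  simp only [get_neighbors_vertices, get_neighbors_vertices_alt]
  set bf := boundary_face.getD [0, 0, 0] with hbf
  set L := ((index.zip bf).zipIdx).foldl pvAdjStep
    (index.map (fun _ => ((-1 : Int), (1 : Int)))) with hL
  have hll : L.length = index.length := by
    rw [hL, foldl_adjStep_length]; simp
  have hrange : List.range 3 = [0, 1, 2] := by decide
  rw [hrange]
  cases hc : L with
  | nil => rw [hc] at hll; simp at hll; omega
  | cons p0 r0 =>
  cases hc1 : r0 with
  | nil => rw [hc, hc1] at hll; simp at hll; omega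
  | cons p1 r1 =>
  cases hc2 : r1 with
  | nil => rw [hc, hc1, hc2] at hll; simp at hll; omega
  | cons p2 r2 =>
  have hget : ∀ k : Nat, k < 3 →
      L.getD k (-1, 1) = if k < min index.length bf.length then
        pvAdj (-1, 1) (index.getD k 0) (bf.getD k 0) else (-1, 1) := by
    intro k hk
    rw [hL]
    exact loopA_getD index bf k (by omega)
  have h0 : p0 = if 0 < min index.length bf.length then
      pvAdj (-1, 1) (index.getD 0 0) (bf.getD 0 0) else (-1, 1) := by
    have := hget 0 (by omega); rw [hc, hc1, hc2] at this; simpa using this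
  have h1 : p1 = if 1 < min index.length bf.length then
      pvAdj (-1, 1) (index.getD 1 0) (bf.getD 1 0) else (-1, 1) := by
    have := hget 1 (by omega); rw [hc, hc1, hc2] at this; simpa using this
  have h2 : p2 = if 2 < min index.length bf.length then
      pvAdj (-1, 1) (index.getD 2 0) (bf.getD 2 0) else (-1, 1) := by
    have := hget 2 (by omega); rw [hc, hc1, hc2] at this; simpa using this
  have hokk : ∀ (c : Bool) (ind b : Int),
      pvPairOK (if c then pvAdj (-1, 1) ind b else (-1, 1)) := by
    intro c ind b
    cases c
    · simp [pvPairOK]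
    · simpa using pvAdj_closed_ok ind b
  have hfk : ∀ k : Nat,
      (if k < min index.length bf.length then
        ((if index.getD k 0 = -1 ∨ bf.getD k 0 = 1 then (0 : Int) else -1),
         (if bf.getD k 0 = -1 ∨ index.getD k 0 = 1 then (0 : Int) else 1))
       else ((-1 : Int), (1 : Int)))
      = if k < min index.length bf.length then
        pvAdj (-1, 1) (index.getD k 0) (bf.getD k 0) else (-1, 1) := by
    intro k
    by_cases h : k < min index.length bf.length <;> simp [h, pvAdj_closed]
  simp only [List.map_cons, List.map_nil]
  rw [hfk 0, hfk 1, hfk 2, ← h0, ← h1, ← h2]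
  apply enum_eq_filter
  · rw [h0]; exact (by by_cases h : 0 < min index.length bf.length <;>
      simp [h, pvPairOK, pvAdj_closed_ok, -pvAdj_closed] <;>
      simpa using pvAdj_closed_ok (index.getD 0 0) (bf.getD 0 0))
  · rw [h1]; exact (by by_cases h : 1 < min index.length bf.length <;>
      simp [h, pvPairOK, pvAdj_closed_ok, -pvAdj_closed] <;>
      simpa using pvAdj_closed_ok (index.getD 1 0) (bf.getD 1 0))
  · rw [h2]; exact (by by_cases h : 2 < min index.length bf.length <;>
      simp [h, pvPairOK, pvAdj_closed_ok, -pvAdj_closed] <;>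
      simpa using pvAdj_closed_ok (index.getD 2 0) (bf.getD 2 0))
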